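-- pv_equiv track=rewrite | github.com/HollandPleskac/Clonr-AI-Characters | backend/app/utils.py | remove_overlaps_in_list_of_strings
-- ===== SOURCE A (Python) =====
-- def _get_removal_index(s1: str, s2: str) -> int | None:
--     candidates = {}
--     for i, x in enumerate(s1):
--         if x == s2[0]:
--             candidates[i] = 0
--         for k in list(candidates):
--             if candidates[k] >= len(s2):
--                 candidates.pop(k)
--             elif x == s2[candidates[k]]:
--                 candidates[k] += 1
--             else:
--                 candidates.pop(k)
--     if candidates:
--         return min(candidates)
--
-- def remove_overlaps_in_list_of_strings(arr: list[str]) -> list[str]: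
--     """Removes overlapping elements from a list of strings.
--     This is useful for removing redundant elements from adjacent
--     retrieved chunks. Given strings ['ABC', 'CDE', 'DEFG'], this would
--     return ['AB', 'C', 'DEFG']
--
--     Args:
--         arr (list[str]): an array of strings with potential overlaps
--
--     Returns:
--         list[str]: deduplicated array
--     """
--     arr = arr.copy()
--     if len(arr) <= 1:
--         return arr
--     for i in range(len(arr) - 1, 0, -1):
--         if (idx := _get_removal_index(arr[i - 1], arr[i])) is not None:
--             if idx <= 0:
--                 arr.pop(i - 1)
--             else:
--                 arr[i - 1] = arr[i - 1][:idx]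
--     return arr
-- ===== SOURCE B (Python) =====
-- def _overlap_start(s1: str, s2: str) -> int | None:
--     # smallest k such that the (nonempty) suffix s1[k:] is a prefix of s2
--     for k in range(max(0, len(s1) - len(s2)), len(s1)):
--         if s2.startswith(s1[k:]):
--             return k
--     return None
--
-- def remove_overlaps_in_list_of_strings(arr: list[str]) -> list[str]:
--     if len(arr) <= 1:
--         return arr.copy()
--     out = [arr[-1]]
--     for s in reversed(arr[:-1]):
--         k = _overlap_start(s, out[0])
--         if k is None:
--             out.insert(0, s)
--         elif k > 0:
--             out.insert(0, s[:k])
--         # k == 0: the whole string overlaps the next chunk, drop it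
--     return out
-- ===== Notes on version B (the rewrite author's own statement) =====
-- stated objective: simpler
-- what changed: A finds the overlap by simulating all partial matches at once in a dict of candidate counters updated per character; B directly tests each suffix start k (only the feasible ones, k >= len(s1)-len(s2)) with s2.startswith(s1[k:]) and returns the first hit, and builds the result back-to-front with a fold instead of mutating the list in place with pop/assignment.
import Mathlib
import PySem

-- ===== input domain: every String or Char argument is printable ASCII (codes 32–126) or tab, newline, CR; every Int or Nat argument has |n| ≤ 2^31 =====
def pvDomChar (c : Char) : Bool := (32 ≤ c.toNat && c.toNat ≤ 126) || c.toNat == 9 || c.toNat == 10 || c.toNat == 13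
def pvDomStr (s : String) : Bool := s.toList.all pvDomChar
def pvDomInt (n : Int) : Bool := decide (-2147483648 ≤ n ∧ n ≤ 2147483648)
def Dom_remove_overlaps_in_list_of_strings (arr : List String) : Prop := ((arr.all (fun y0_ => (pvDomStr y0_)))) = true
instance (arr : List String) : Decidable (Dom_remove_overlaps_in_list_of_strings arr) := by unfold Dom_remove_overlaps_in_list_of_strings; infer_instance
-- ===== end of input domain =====

-- B replaces A's per-character dict of partial-match counters by a direct first-matching-suffix
-- scan and builds the result back-to-front with a fold instead of in-place pops (objective: simpler).


-- ===== PORT A =====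
def pvGriStep (cs2 : List Char) (cand : PySem.Dict Int Int) (ix : Int × Char) : PySem.Dict Int Int :=
  let cand1 := if some ix.2 == PySem.List.pyGet? cs2 0 then cand.insert ix.1 0 else cand
  cand1.keys.foldl (fun c k =>
    if c.getD k 0 ≥ (cs2.length : Int) then c.erase k
    else if some ix.2 == PySem.List.pyGet? cs2 (c.getD k 0) then c.modify k 0 (· + 1)
    else c.erase k) cand1

def pvGetRemovalIndex (s1 s2 : String) : Option Int :=
  let cand := (PySem.List.enumerate s1.toList 0).foldl (pvGriStep s2.toList) (PySem.Dict.mk [])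
  PySem.List.min? cand.keys id

def pvStepA (a : List String) (i : Int) : List String :=
  match pvGetRemovalIndex (PySem.List.pyGetD a (i - 1) "") (PySem.List.pyGetD a i "") with
  | none => a
  | some idx =>
    if idx ≤ 0 then ((PySem.List.pop? a (i - 1)).map (·.2)).getD a
    else PySem.List.pySetD a (i - 1)
      (PySem.Str.slice (PySem.List.pyGetD a (i - 1) "") none (some idx))

def remove_overlaps_in_list_of_strings (arr : List String) : List String :=
  if PySem.List.len arr ≤ 1 then arr else
  (PySem.List.pyRange (PySem.List.len arr - 1) 0 (-1)).foldl pvStepA arr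

-- ===== PORT B =====
def pvOverlapStart (s1 s2 : String) : Option Int :=
  (PySem.List.pyRange (max 0 (PySem.Str.len s1 - PySem.Str.len s2)) (PySem.Str.len s1) 1).find?
    (fun k => PySem.Str.startswith s2 (PySem.Str.slice s1 (some k) none))

def pvStepB (out : List String) (s : String) : List String :=
  match out with
  | [] => out
  | h :: _ =>
    match pvOverlapStart s h with
    | none => s :: out
    | some k => if k > 0 then PySem.Str.slice s none (some k) :: out else out

def remove_overlaps_in_list_of_strings_alt (arr : List String) : List String :=
  if PySem.List.len arr ≤ 1 then arr else
  ((PySem.List.slice arr none (some (-1))).reverse).foldl pvStepB [PySem.List.pyGetD arr (-1) ""]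

-- ===== PRECONDITION & SPEC =====
-- Pre_ excludes exactly the inputs on which A raises IndexError: a nonempty string
-- immediately followed by an empty string (A evaluates s2[0] with s2 = '').
def Pre_remove_overlaps_in_list_of_strings (arr : List String) : Prop :=
  List.IsChain (fun a b => b = "" → a = "") arr
instance (arr : List String) : Decidable (Pre_remove_overlaps_in_list_of_strings arr) := by
  unfold Pre_remove_overlaps_in_list_of_strings; infer_instance
def pvWitness_remove_overlaps_in_list_of_strings : List String := ["ABC", "CDE", "DEFG"]

def Spec_remove_overlaps_in_list_of_strings (arr : List String) (out : List String) : Prop :=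
  out = remove_overlaps_in_list_of_strings_alt arr
instance (arr : List String) (out : List String) : Decidable (Spec_remove_overlaps_in_list_of_strings arr out) := by
  unfold Spec_remove_overlaps_in_list_of_strings; infer_instance

-- ===== CLAIM (what is proved, stated in full; the proofs are below) =====
def Claim_equal_remove_overlaps_in_list_of_strings : Prop :=
  ∀ (arr : List String), Dom_remove_overlaps_in_list_of_strings arr →
    Pre_remove_overlaps_in_list_of_strings arr →
    Spec_remove_overlaps_in_list_of_strings arr (remove_overlaps_in_list_of_strings arr)
-- ===== LEMMAS AND PROOFS =====
theorem pvFindKey (pre rest : List (Int × Int)) (k0 : Int) (c0 : Int)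
    (h : k0 ∉ pre.map Prod.fst) :
    List.find? (fun p => p.1 == k0) (pre ++ (k0, c0) :: rest) = some (k0, c0) := by
  induction pre with
  | nil => simp
  | cons a t ih =>
    simp only [List.map_cons, List.mem_cons, not_or] at h
    have : (a.1 == k0) = false := by simp [Ne.symm h.1]
    simp only [List.cons_append, List.find?_cons, this]
    exact ih h.2

theorem pvFilterNe (l : List (Int × Int)) (k0 : Int) (h : k0 ∉ l.map Prod.fst) :
    l.filter (fun p => !(p.1 == k0)) = l := by
  induction l with
  | nil => rfl
  | cons a t ih =>
    simp only [List.map_cons, List.mem_cons, not_or] at h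
    simp [Ne.symm h.1, ih h.2]

theorem pvMapReplaceNe (l : List (Int × Int)) (k0 : Int) (v : Int) (h : k0 ∉ l.map Prod.fst) :
    l.map (fun p => if p.1 = k0 then (k0, v) else p) = l := by
  induction l with
  | nil => rfl
  | cons a t ih =>
    simp only [List.map_cons, List.mem_cons, not_or] at h
    rw [List.map_cons, ih h.2, if_neg (Ne.symm h.1)]

def pvPhi (x : Char) (cs2 : List Char) (p : Int × Int) : Option (Int × Int) :=
  if p.2 ≥ (cs2.length : Int) then none
  else if some x == PySem.List.pyGet? cs2 p.2 then some (p.1, p.2 + 1) else none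

theorem pvInnerFold (x : Char) (cs2 : List Char) :
    ∀ (l pre : List (Int × Int)),
      (∀ p ∈ l, (p.1 ∉ pre.map Prod.fst)) → (l.map Prod.fst).Nodup →
      (l.map Prod.fst).foldl (fun c k =>
        if c.getD k 0 ≥ (cs2.length : Int) then c.erase k
        else if some x == PySem.List.pyGet? cs2 (c.getD k 0) then c.modify k 0 (· + 1)
        else c.erase k) (PySem.Dict.mk (pre ++ l)) =
      PySem.Dict.mk (pre ++ l.filterMap (pvPhi x cs2)) := by
  intro l
  induction l with
  | nil => intro pre _ _; simp
  | cons a rest ih =>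
    intro pre hpre hnd
    obtain ⟨k0, c0⟩ := a
    have hk0pre : k0 ∉ pre.map Prod.fst := hpre (k0, c0) (List.mem_cons_self)
    have hk0rest : k0 ∉ rest.map Prod.fst := by
      simp only [List.map_cons, List.nodup_cons] at hnd; exact hnd.1
    have hndr : (rest.map Prod.fst).Nodup := by
      simp only [List.map_cons, List.nodup_cons] at hnd; exact hnd.2
    have hget : (PySem.Dict.mk (pre ++ (k0, c0) :: rest)).getD k0 0 = c0 := by
      simp [PySem.Dict.getD, PySem.Dict.get?, pvFindKey pre rest k0 c0 hk0pre]
    have herase : (PySem.Dict.mk (pre ++ (k0, c0) :: rest)).erase k0 =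
        PySem.Dict.mk (pre ++ rest) := by
      simp [PySem.Dict.erase, List.filter_append, pvFilterNe pre k0 hk0pre,
        List.filter_cons, pvFilterNe rest k0 hk0rest]
    have hcont : (PySem.Dict.mk (pre ++ (k0, c0) :: rest)).contains k0 = true := by
      simp [PySem.Dict.contains]
    have hmod : (PySem.Dict.mk (pre ++ (k0, c0) :: rest)).modify k0 0 (· + 1) =
        PySem.Dict.mk (pre ++ (k0, c0 + 1) :: rest) := by
      simp only [PySem.Dict.modify, hget, PySem.Dict.insert, hcont, if_true]
      simp only [List.map_append, List.map_cons, beq_iff_eq, BEq.rfl, if_true, if_pos rfl]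
      rw [pvMapReplaceNe pre k0 _ hk0pre, pvMapReplaceNe rest k0 _ hk0rest]
    simp only [List.map_cons, List.foldl_cons, hget]
    by_cases h1 : c0 ≥ (cs2.length : Int)
    · rw [if_pos h1, herase, ih pre (fun p hp => hpre p (by simp [hp])) hndr]
      simp [List.filterMap_cons, pvPhi, h1]
    · rw [if_neg h1]
      by_cases h2 : some x == PySem.List.pyGet? cs2 c0
      · rw [if_pos h2, hmod]
        have := ih (pre ++ [(k0, c0 + 1)]) (fun p hp => by
          simp only [List.map_append, List.mem_append, not_or]
          exact ⟨hpre p (by simp [hp]), by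
            simp only [List.map_cons, List.map_nil, List.mem_cons, List.not_mem_nil, or_false]
            intro hpk; exact hk0rest (hpk ▸ (List.mem_map_of_mem hp))⟩) hndr
        rw [List.append_assoc] at this
        simp only [List.cons_append, List.nil_append] at this
        rw [this]
        simp [List.filterMap_cons, pvPhi, h1, eq_of_beq h2]
      · rw [if_neg h2, herase, ih pre (fun p hp => hpre p (by simp [hp])) hndr]
        have h2' : ¬ (some x = PySem.List.pyGet? cs2 c0) := fun h => h2 (beq_iff_eq.mpr h)
        simp [List.filterMap_cons, pvPhi, h1, h2']

def pvCand (cs1 cs2 : List Char) (i : Nat) : List (Int × Int) :=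
  (List.range i).filterMap (fun k =>
    if i - k ≤ cs2.length ∧ cs2.take (i - k) = (cs1.drop k).take (i - k)
    then some ((k : Int), ((i - k : Nat) : Int)) else none)

theorem pvFilterMapIf {α β : Type} (p : α → Prop) [DecidablePred p] (g : α → β) (l : List α) :
    l.filterMap (fun a => if p a then some (g a) else none) =
      (l.filter (fun a => decide (p a))).map g := by
  induction l with
  | nil => rfl
  | cons a t ih =>
    by_cases h : p a <;> simp [List.filterMap_cons, List.filter_cons, h, ih]

theorem pvCand_fst (cs1 cs2 : List Char) (i : Nat) :
    (pvCand cs1 cs2 i).map Prod.fst =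
      ((List.range i).filter (fun k =>
        decide (i - k ≤ cs2.length ∧ cs2.take (i - k) = (cs1.drop k).take (i - k)))).map
        (fun (k : Nat) => (k : Int)) := by
  unfold pvCand
  rw [List.map_filterMap]
  rw [show (fun k => Option.map Prod.fst
      (if i - k ≤ cs2.length ∧ cs2.take (i - k) = (cs1.drop k).take (i - k)
       then some ((k : Int), ((i - k : Nat) : Int)) else none)) =
      (fun k => if i - k ≤ cs2.length ∧ cs2.take (i - k) = (cs1.drop k).take (i - k)
       then some ((k : Int)) else none) from funext fun k => by split <;> simp]
  exact pvFilterMapIf (fun k => i - k ≤ cs2.length ∧ cs2.take (i - k) = (cs1.drop k).take (i - k)) (fun (k : Nat) => (k : Int)) (List.range i)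

theorem pvCand_fst_nodup (cs1 cs2 : List Char) (i : Nat) :
    ((pvCand cs1 cs2 i).map Prod.fst).Nodup := by
  rw [pvCand_fst]
  refine List.Nodup.map (fun a b h => Int.natCast_inj.mp h) ?_
  exact (List.nodup_range).filter _

theorem pvCand_fst_lt (cs1 cs2 : List Char) (i : Nat) :
    ∀ q ∈ (pvCand cs1 cs2 i).map Prod.fst, q < (i : Int) := by
  rw [pvCand_fst]
  intro q hq
  simp only [List.mem_map, List.mem_filter, List.mem_range] at hq
  obtain ⟨k, ⟨hk, _⟩, rfl⟩ := hq
  exact_mod_cast hk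

theorem pvPsi_step (cs1 cs2 : List Char) (i k : Nat) (hi : i < cs1.length) (hk : k < i) :
    ((if i - k ≤ cs2.length ∧ cs2.take (i - k) = (cs1.drop k).take (i - k)
       then some ((k : Int), ((i - k : Nat) : Int)) else none).bind (pvPhi cs1[i] cs2)) =
    (if i + 1 - k ≤ cs2.length ∧ cs2.take (i + 1 - k) = (cs1.drop k).take (i + 1 - k)
       then some ((k : Int), ((i + 1 - k : Nat) : Int)) else none) := by
  by_cases hC : i - k ≤ cs2.length ∧ cs2.take (i - k) = (cs1.drop k).take (i - k)
  · rw [if_pos hC, Option.bind_some _ _]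
    unfold pvPhi
    by_cases hfull : i - k = cs2.length
    · rw [if_pos (by simp; omega), if_neg (fun h => by omega)]
    · have hlt : i - k < cs2.length := lt_of_le_of_ne hC.1 hfull
      rw [if_neg (by simp; omega)]
      have hpy : PySem.List.pyGet? cs2 ((i - k : Nat) : Int) = some cs2[i - k] := by
        simp [List.getElem?_eq_getElem hlt]
      rw [hpy]
      have hsucc2 : cs2.take (i + 1 - k) = cs2.take (i - k) ++ [cs2[i - k]] := by
        rw [show i + 1 - k = (i - k) + 1 by omega, List.take_succ,
          List.getElem?_eq_getElem hlt, Option.toList_some]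
      have hsucc1 : (cs1.drop k).take (i + 1 - k) = (cs1.drop k).take (i - k) ++ [cs1[i]] := by
        rw [show i + 1 - k = (i - k) + 1 by omega, List.take_succ]
        have hd : (cs1.drop k)[i - k]? = some cs1[i] := by
          rw [List.getElem?_drop, show k + (i - k) = i by omega, List.getElem?_eq_getElem hi]
        rw [hd, Option.toList_some]
      by_cases hx : cs1[i] = cs2[i - k]
      · rw [if_pos (by simp [hx]),
          if_pos ⟨by omega, by rw [hsucc2, hsucc1, hC.2, hx]⟩,
          show ((i - k : Nat) : Int) + 1 = ((i + 1 - k : Nat) : Int) by omega]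
      · rw [if_neg (by simp [hx]), if_neg ?_]
        intro h
        rw [hsucc2, hsucc1, hC.2] at h
        exact hx (List.cons.injEq .. ▸ (List.append_cancel_left h.2) |>.1).symm
  · rw [if_neg hC, show (none : Option (Int × Int)).bind (pvPhi cs1[i] cs2) = none from rfl, if_neg ?_]
    intro h
    refine hC ⟨by omega, ?_⟩
    have := congrArg (List.take (i - k)) h.2
    rwa [List.take_take, List.take_take,
      min_eq_left (show i - k ≤ i + 1 - k by omega)] at this

theorem pvCand_succ_eq (cs1 cs2 : List Char) (i : Nat) (hi : i < cs1.length) :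
    (pvCand cs1 cs2 i).filterMap (pvPhi cs1[i] cs2) ++
      (if some cs1[i] == PySem.List.pyGet? cs2 0 then [((i : Int), (1 : Int))] else []) =
    pvCand cs1 cs2 (i + 1) := by
  unfold pvCand
  rw [List.filterMap_filterMap]
  conv_rhs => rw [List.range_succ, List.filterMap_append]
  congr 1
  · exact List.filterMap_congr (fun k hk => pvPsi_step cs1 cs2 i k hi (List.mem_range.mp hk))
  · rw [List.filterMap_cons, List.filterMap_nil]
    have hii : i + 1 - i = 1 := by omega
    cases cs2 with
    | nil =>
      rw [if_neg (by simp [PySem.List.pyGet?, PySem.List.pyIdx?]), if_neg (by simp)]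
    | cons c t =>
      have hdrop : (cs1.drop i).take 1 = [cs1[i]] := by
        rw [List.drop_eq_getElem_cons hi]; rfl
      by_cases hx : cs1[i] = c
      · rw [if_pos (by rw [PySem.List.pyGet?_zero_cons]; simp [hx]),
          if_pos ⟨by simp, by rw [hii]; simp [hdrop, hx]⟩, hii]
        simp
      · rw [if_neg (by rw [PySem.List.pyGet?_zero_cons]; simpa using fun hcontra => hx hcontra), if_neg ?_]
        intro h
        have h2 := h.2
        rw [hii, hdrop] at h2
        exact hx (show c = cs1[i] by simpa using h2).symm

theorem pvGriStep_cand (cs1 cs2 : List Char) (i : Nat) (hi : i < cs1.length) :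
    pvGriStep cs2 (PySem.Dict.mk (pvCand cs1 cs2 i)) ((i : Int), cs1[i]) =
      PySem.Dict.mk (pvCand cs1 cs2 (i + 1)) := by
  have hlt := pvCand_fst_lt cs1 cs2 i
  have hnd := pvCand_fst_nodup cs1 cs2 i
  have hnotmem : ((i : Int)) ∉ (pvCand cs1 cs2 i).map Prod.fst :=
    fun hm => lt_irrefl _ (hlt _ hm)
  simp only [pvGriStep]
  by_cases hins : (some cs1[i] == PySem.List.pyGet? cs2 0) = true
  · rw [if_pos hins]
    have hcont : (PySem.Dict.mk (pvCand cs1 cs2 i)).contains ((i : Int)) = false := by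
      simp only [PySem.Dict.contains, List.any_eq_false]
      intro p hp
      simp only [beq_iff_eq]
      exact fun hpe => hnotmem (hpe ▸ List.mem_map_of_mem hp)
    have hinsert : (PySem.Dict.mk (pvCand cs1 cs2 i)).insert ((i : Int)) 0 =
        PySem.Dict.mk (pvCand cs1 cs2 i ++ [((i : Int), 0)]) := by
      simp [PySem.Dict.insert, hcont]
    rw [hinsert]
    have hkeys : (PySem.Dict.mk (pvCand cs1 cs2 i ++ [((i : Int), 0)])).keys =
        (pvCand cs1 cs2 i ++ [((i : Int), 0)]).map Prod.fst := rfl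
    rw [hkeys]
    have := pvInnerFold cs1[i] cs2 (pvCand cs1 cs2 i ++ [((i : Int), 0)]) []
      (by simp) (by
        rw [List.map_append]
        exact List.Nodup.append hnd (List.nodup_singleton _)
          (by intro q hq hq2; simp at hq2; subst hq2; exact hnotmem hq))
    rw [List.nil_append] at this
    rw [this, List.nil_append, List.filterMap_append]
    have hsingle : List.filterMap (pvPhi cs1[i] cs2) [((i : Int), 0)] = [((i : Int), (1 : Int))] := by
      have hne : cs2 ≠ [] := by
        intro hnil; subst hnil
        simp [PySem.List.pyGet?, PySem.List.pyIdx?] at hins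
      simp only [List.filterMap_cons, List.filterMap_nil, pvPhi]
      rw [if_neg (by
        have : 0 < cs2.length := List.length_pos_iff.mpr hne
        simp; omega), if_pos hins]
      norm_num
    rw [hsingle, pvCand_succ_eq cs1 cs2 i hi |>.symm, if_pos hins]
  · rw [if_neg hins]
    have := pvInnerFold cs1[i] cs2 (pvCand cs1 cs2 i) [] (by simp) hnd
    rw [List.nil_append] at this
    rw [show (PySem.Dict.mk (pvCand cs1 cs2 i)).keys = (pvCand cs1 cs2 i).map Prod.fst from rfl,
      this, List.nil_append, ← pvCand_succ_eq cs1 cs2 i hi, if_neg hins, List.append_nil]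

theorem pvGri_take (cs1 cs2 : List Char) : ∀ i, i ≤ cs1.length →
    (PySem.List.enumerate (cs1.take i) 0).foldl (pvGriStep cs2) (PySem.Dict.mk []) =
      PySem.Dict.mk (pvCand cs1 cs2 i) := by
  intro i
  induction i with
  | zero => intro _; simp [pvCand]
  | succ i ih =>
    intro hle
    have hi : i < cs1.length := by omega
    rw [List.take_succ, List.getElem?_eq_getElem hi, Option.toList_some,
      PySem.List.enumerate_append, List.foldl_append, ih (by omega)]
    have hlen : (cs1.take i).length = i := by simp [List.length_take]; omega
    rw [hlen, PySem.List.enumerate_cons, PySem.List.enumerate_nil]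
    simp only [List.foldl_cons, List.foldl_nil, zero_add]
    exact pvGriStep_cand cs1 cs2 i hi

theorem pvGri_eq_cand (cs1 cs2 : List Char) :
    (PySem.List.enumerate cs1 0).foldl (pvGriStep cs2) (PySem.Dict.mk []) =
      PySem.Dict.mk (pvCand cs1 cs2 cs1.length) := by
  have := pvGri_take cs1 cs2 cs1.length (le_refl _)
  rwa [List.take_length] at this

theorem pvMinCons : ∀ (t : List Int) (m : Int), (∀ y ∈ t, m < y) →
    PySem.List.min? (m :: t) id = some m := by
  intro t
  induction t with
  | nil => intro m _; rfl
  | cons a t ih =>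
    intro m h
    have hma : m < a := h a List.mem_cons_self
    have hstep : PySem.List.min? (m :: a :: t) id = PySem.List.min? (m :: t) id := by
      simp only [PySem.List.min?, List.foldl_cons]
      congr 1
      simp only [id_eq]
      rw [if_neg (by omega)]
    rw [hstep, ih m (fun y hy => h y (List.mem_cons_of_mem _ hy))]

theorem pvMinHead (l : List Int) (h : l.Pairwise (· < ·)) :
    PySem.List.min? l id = l.head? := by
  cases l with
  | nil => rfl
  | cons a t =>
    rw [List.head?_cons]
    exact pvMinCons t a (fun y hy => (List.pairwise_cons.mp h).1 y hy)

theorem pvFindCongr {α : Type} (l : List α) (p q : α → Bool) (h : ∀ x ∈ l, p x = q x) :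
    l.find? p = l.find? q := by
  induction l with
  | nil => rfl
  | cons a t ih =>
    rw [List.find?_cons, List.find?_cons, h a List.mem_cons_self]
    cases q a
    · exact ih (fun x hx => h x (List.mem_cons_of_mem _ hx))
    · rfl

theorem pvOverlapAux (cs1 cs2 : List Char) :
    PySem.List.min? ((PySem.Dict.mk (pvCand cs1 cs2 cs1.length)).keys) id =
    (PySem.List.pyRange (max 0 ((cs1.length : Int) - (cs2.length : Int))) ((cs1.length : Int)) 1).find?
      (fun k => PySem.Chars.startswith cs2 (PySem.List.slice cs1 (some k) none)) := by
  set n := cs1.length with hn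
  set n2 := cs2.length with hn2
  set C : Nat → Bool := fun k =>
    decide (n - k ≤ n2 ∧ cs2.take (n - k) = (cs1.drop k).take (n - k)) with hCdef
  set aN : Nat := n - n2 with haN
  -- left side: min? of the increasing key list is its head
  have hkeys : (PySem.Dict.mk (pvCand cs1 cs2 n)).keys = (pvCand cs1 cs2 n).map Prod.fst := rfl
  rw [hkeys, pvCand_fst,
    pvMinHead _ (List.pairwise_map.mpr (((List.pairwise_lt_range).filter C).imp
      (fun h => by exact_mod_cast h)))]
  -- right side: find? over the feasible range
  have hrange : max 0 ((n : Int) - (n2 : Int)) = ((aN : Nat) : Int) := by omega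
  rw [hrange, PySem.List.pyRange_one,
    show (((n : Int)) - ((aN : Nat) : Int)).toNat = n - aN by omega, List.find?_map]
  -- pointwise: the startswith test equals C on the scanned range
  have hpt : ∀ j ∈ List.range (n - aN),
      ((fun k => PySem.Chars.startswith cs2 (PySem.List.slice cs1 (some k) none)) ∘
        (fun (k : Nat) => ((aN : Nat) : Int) + (k : Int))) j = C (aN + j) := by
    intro j hj
    have hjlt : j < n - aN := List.mem_range.mp hj
    show PySem.Chars.startswith cs2
        (PySem.List.slice cs1 (some (((aN : Nat) : Int) + ((j : Nat) : Int))) none) = C (aN + j)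
    rw [show ((aN : Nat) : Int) + ((j : Nat) : Int) = (((aN + j : Nat)) : Int) by omega,
      PySem.List.slice_from_natCast]
    set k : Nat := aN + j with hkdef
    have hlendrop : (cs1.drop k).length = n - k := by simp [hn]
    by_cases hp : (cs1.drop k) <+: cs2
    · rw [(PySem.Chars.startswith_iff cs2 (cs1.drop k)).mpr hp]
      have hCk : C k = true := by
        simp only [hCdef, decide_eq_true_eq]
        have hle : n - k ≤ n2 := by have := hp.length_le; omega
        have heq : cs1.drop k = cs2.take (n - k) := by
          have h2 := List.prefix_iff_eq_take.mp hp
          rwa [hlendrop] at h2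
        exact ⟨hle, by rw [List.take_of_length_le (le_of_eq hlendrop)]; exact heq.symm⟩
      rw [hCk]
    · have h1 : PySem.Chars.startswith cs2 (cs1.drop k) = false :=
        Bool.eq_false_iff.mpr (fun hc => hp ((PySem.Chars.startswith_iff cs2 (cs1.drop k)).mp hc))
      have hCk : C k = false := by
        have hno : ¬ (n - k ≤ n2 ∧ cs2.take (n - k) = (cs1.drop k).take (n - k)) := by
          intro hand
          apply hp
          rw [List.prefix_iff_eq_take, hlendrop]
          have heq := hand.2
          rw [List.take_of_length_le (le_of_eq hlendrop)] at heq
          exact heq.symm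
        simp only [hCdef]
        exact decide_eq_false hno
      rw [h1, hCk]
  rw [pvFindCongr _ _ _ hpt,
    show (List.range (n - aN)).find? (fun j => C (aN + j)) =
      ((List.range (n - aN)).filter (fun j => C (aN + j))).head? from (List.head?_filter).symm,
    ← List.head?_map]
  congr 1
  have hsplit : List.range n = List.range aN ++ (List.range (n - aN)).map (fun x => aN + x) := by
    rw [← List.range_add]; congr 1; omega
  have hnilfilter : (List.range aN).filter C = [] := by
    rw [List.filter_eq_nil_iff]
    intro x hx
    have hxlt : x < aN := List.mem_range.mp hx
    simp only [hCdef, decide_eq_true_eq, not_and]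
    intro hle
    omega
  rw [hsplit, List.filter_append, hnilfilter, List.nil_append, List.filter_map, List.map_map]
  apply List.map_congr_left
  intro j hj
  show (((aN + j : Nat)) : Int) = ((aN : Nat) : Int) + ((j : Nat) : Int)
  omega

theorem pvGri_eq_overlap (s1 s2 : String) :
    pvGetRemovalIndex s1 s2 = pvOverlapStart s1 s2 := by
  simp only [pvGetRemovalIndex, pvOverlapStart]
  rw [pvGri_eq_cand]
  have hfun : (fun (k : Int) => PySem.Str.startswith s2 (PySem.Str.slice s1 (some k) none)) =
      (fun (k : Int) => PySem.Chars.startswith s2.toList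
        (PySem.List.slice s1.toList (some k) none)) := by
    funext k
    rw [PySem.Str.startswith_eq, PySem.Str.toList_slice, PySem.Chars.slice_eq_listSlice]
  have hlen1 : PySem.Str.len s1 = ((s1.toList.length : Nat) : Int) := by simp
  have hlen2 : PySem.Str.len s2 = ((s2.toList.length : Nat) : Int) := by simp
  rw [hfun, hlen1, hlen2]
  exact pvOverlapAux s1.toList s2.toList

def pvSF (orig : List String) (hne : orig ≠ []) (j : Nat) : List String :=
  (((orig.take (orig.length - 1)).drop j).reverse).foldl pvStepB [orig.getLast hne]

theorem pvStepB_ne (out : List String) (s : String) (h : out ≠ []) : pvStepB out s ≠ [] := by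
  cases out with
  | nil => exact absurd rfl h
  | cons h0 t0 =>
    simp only [pvStepB]
    cases hov : pvOverlapStart s h0 with
    | none => simp
    | some k => simp only [hov]; split <;> simp

theorem pvFoldB_ne (l : List String) : ∀ acc : List String, acc ≠ [] →
    l.foldl pvStepB acc ≠ [] := by
  induction l with
  | nil => intro acc h; exact h
  | cons a t ih => intro acc h; exact ih _ (pvStepB_ne acc a h)

theorem pvSF_ne (orig : List String) (hne : orig ≠ []) (j : Nat) : pvSF orig hne j ≠ [] :=
  pvFoldB_ne _ _ (by simp)

theorem pvStepA_on (orig : List String) (hne : orig ≠ []) (j : Nat)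
    (hj : j + 1 ≤ orig.length - 1) :
    pvStepA (orig.take (j + 1) ++ pvSF orig hne (j + 1)) (((j + 1 : Nat) : Int)) =
      orig.take j ++ pvSF orig hne j := by
  have hnpos : 0 < orig.length := List.length_pos_of_ne_nil hne
  have hj2 : j + 1 < orig.length := by omega
  have hjn : j < orig.length := by omega
  set T := pvSF orig hne (j + 1) with hT
  have hTne : T ≠ [] := pvSF_ne orig hne (j + 1)
  have hlentake : (orig.take (j + 1)).length = j + 1 := List.length_take_of_le (by omega)
  have harr : orig.take (j + 1) ++ T = orig.take j ++ orig[j] :: T := by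
    rw [List.take_succ_eq_append_getElem hjn, List.append_assoc, List.singleton_append]
  have hcast : ((j + 1 : Nat) : Int) - 1 = ((j : Nat) : Int) := by omega
  have hget1? : (orig.take (j + 1) ++ T)[j]? = some orig[j] := by
    rw [List.getElem?_append_left (by omega)]
    rw [List.getElem?_eq_getElem (by omega)]
    congr 1
    exact List.getElem_take
  have hget1 : PySem.List.pyGetD (orig.take (j + 1) ++ T) (((j + 1 : Nat) : Int) - 1) "" =
      orig[j] := by
    rw [hcast, PySem.List.pyGetD_natCast]
    simp [List.getD, hget1?]
  have hSFj : pvSF orig hne j = pvStepB T orig[j] := by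
    rw [hT]
    unfold pvSF
    have hdropstep : (orig.take (orig.length - 1)).drop j =
        orig[j] :: (orig.take (orig.length - 1)).drop (j + 1) := by
      rw [List.drop_eq_getElem_cons (by
        rw [List.length_take_of_le (by omega)]; omega)]
      congr 1
      exact List.getElem_take
    rw [hdropstep, List.reverse_cons, List.foldl_append, List.foldl_cons, List.foldl_nil]
  obtain ⟨h0, t0, hTc⟩ := List.exists_cons_of_ne_nil hTne
  have hget2 : PySem.List.pyGetD (orig.take (j + 1) ++ T) ((j + 1 : Nat) : Int) "" = h0 := by
    rw [PySem.List.pyGetD_natCast]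
    have hx : (orig.take (j + 1) ++ T)[j + 1]? = some h0 := by
      rw [List.getElem?_append_right (le_of_eq hlentake)]
      simp [hlentake, hTc]
    simp [List.getD, hx]
  unfold pvStepA
  rw [hget1, hget2, pvGri_eq_overlap, hSFj]
  split
  next hov =>
    rw [harr, hTc]
    simp only [pvStepB, hov]
  next idx hov =>
    by_cases hid : idx ≤ 0
    · rw [if_pos hid, hcast, harr]
      have hlen : j < (List.take j orig ++ orig[j] :: T).length := by
        rw [List.length_append, List.length_take_of_le (show j ≤ orig.length by omega)]
        simp
      have hpop : (List.take j orig ++ orig[j] :: T).eraseIdx j = List.take j orig ++ T := by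
        rw [List.eraseIdx_append_of_length_le
          (le_of_eq (List.length_take_of_le (show j ≤ orig.length by omega))) _]
        rw [List.length_take_of_le (show j ≤ orig.length by omega), Nat.sub_self,
          List.eraseIdx_cons_zero]
      rw [PySem.List.pop?_natCast _ j hlen, Option.map_some, Option.getD_some, hpop]
      show List.take j orig ++ T = List.take j orig ++ pvStepB T orig[j]
      rw [hTc]
      simp only [pvStepB, hov]
      rw [if_neg (by omega)]
    · rw [if_neg hid, hcast, PySem.List.pySetD_natCast, harr, List.set_append,
        if_neg (by rw [List.length_take_of_le (show j ≤ orig.length by omega)]; omega),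
        List.length_take_of_le (show j ≤ orig.length by omega), Nat.sub_self,
        List.set_cons_zero, hTc]
      simp only [pvStepB, hov]
      rw [if_pos (by omega)]

theorem pvRangeStep (a b : Int) (h : b + 1 ≤ a) :
    PySem.List.pyRange a b (-1) = PySem.List.pyRange a (b + 1) (-1) ++ [b + 1] := by
  rw [PySem.List.pyRange_neg_one_eq_reverse, PySem.List.pyRange_neg_one_eq_reverse,
    PySem.List.pyRange_one_cons (by omega), List.reverse_cons]

theorem pvOuter (orig : List String) (hne : orig ≠ []) :
    ∀ d j, j ≤ orig.length - 1 → orig.length - 1 - j = d →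
      (PySem.List.pyRange ((orig.length : Int) - 1) ((j : Nat) : Int) (-1)).foldl pvStepA orig =
        orig.take j ++ pvSF orig hne j := by
  have hnpos : 0 < orig.length := List.length_pos_of_ne_nil hne
  intro d
  induction d with
  | zero =>
    intro j hj hd
    have hj' : j = orig.length - 1 := by omega
    subst hj'
    rw [PySem.List.pyRange_neg_one_eq_nil (by omega), List.foldl_nil]
    have hSF : pvSF orig hne (orig.length - 1) = [orig.getLast hne] := by
      unfold pvSF
      rw [List.drop_of_length_le (by rw [List.length_take_of_le (by omega)]),
        List.reverse_nil, List.foldl_nil]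
    rw [hSF, ← List.dropLast_eq_take]
    exact (List.dropLast_concat_getLast hne).symm
  | succ d ih =>
    intro j hj hd
    have hjlt : j + 1 ≤ orig.length - 1 := by omega
    rw [pvRangeStep _ _ (by omega), List.foldl_append, List.foldl_cons, List.foldl_nil,
      show ((j : Nat) : Int) + 1 = (((j + 1 : Nat)) : Int) by omega,
      ih (j + 1) (by omega) (by omega)]
    exact pvStepA_on orig hne j hjlt

theorem pv_main (arr : List String) : remove_overlaps_in_list_of_strings arr = remove_overlaps_in_list_of_strings_alt arr := by
  unfold remove_overlaps_in_list_of_strings remove_overlaps_in_list_of_strings_alt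
  by_cases h : PySem.List.len arr ≤ 1
  · rw [if_pos h, if_pos h]
  · rw [if_neg h, if_neg h]
    have hlen : 2 ≤ arr.length := by
      rw [PySem.List.len_eq] at h
      omega
    have hne : arr ≠ [] := by
      intro he
      rw [he] at hlen
      simp at hlen
    have h0 := pvOuter arr hne (arr.length - 1) 0 (by omega) (by omega)
    rw [show (((0 : Nat)) : Int) = (0 : Int) by simp] at h0
    rw [PySem.List.len_eq, h0, List.take_zero, List.nil_append,
      PySem.List.slice_to_neg_one, List.dropLast_eq_take, PySem.List.pyGetD_neg_one _ _ hne]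
    unfold pvSF
    rw [List.drop_zero]

-- ===== VERDICT (by name: the statement is the Claim_ definition above) =====
theorem remove_overlaps_in_list_of_strings_spec : Claim_equal_remove_overlaps_in_list_of_strings := by
  intro arr _ _
  unfold Spec_remove_overlaps_in_list_of_strings
  exact pv_main arr
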